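-- pv_equiv track=rewrite | github.com/ysabelgodoydelgado/test-paquetes | modules/maxcam_movil/controllers/sale_order.py | product_duplicate
-- ===== SOURCE A (Python) =====
-- def product_duplicate(sale_order):
-- 	product_ids = []
-- 	lines = sale_order.get('order_line', False)
-- 	flag = True
-- 	if lines:
-- 		for so_line in lines:
-- 			product_id = so_line.get('product_id', False)
-- 			if product_id and product_id not in product_ids:
-- 				product_ids.append(product_id)
-- 			else:
-- 				flag = False
-- 	return flag
-- ===== SOURCE B (Python) =====
-- def product_duplicate(sale_order):
--     lines = sale_order.get('order_line', False)
--     if not lines: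
--         return True
--     product_ids = [so_line.get('product_id', False) for so_line in lines]
--     return all(product_ids) and len(set(product_ids)) == len(product_ids)
-- ===== Notes on version B (the rewrite author's own statement) =====
-- stated objective: simpler
-- what changed: Replaced A's incremental scan that threads a running seen-list and a flag with two aggregate passes: collect all product_ids by a comprehension, then return all(product_ids) and len(set(product_ids)) == len(product_ids).
import Mathlib
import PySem

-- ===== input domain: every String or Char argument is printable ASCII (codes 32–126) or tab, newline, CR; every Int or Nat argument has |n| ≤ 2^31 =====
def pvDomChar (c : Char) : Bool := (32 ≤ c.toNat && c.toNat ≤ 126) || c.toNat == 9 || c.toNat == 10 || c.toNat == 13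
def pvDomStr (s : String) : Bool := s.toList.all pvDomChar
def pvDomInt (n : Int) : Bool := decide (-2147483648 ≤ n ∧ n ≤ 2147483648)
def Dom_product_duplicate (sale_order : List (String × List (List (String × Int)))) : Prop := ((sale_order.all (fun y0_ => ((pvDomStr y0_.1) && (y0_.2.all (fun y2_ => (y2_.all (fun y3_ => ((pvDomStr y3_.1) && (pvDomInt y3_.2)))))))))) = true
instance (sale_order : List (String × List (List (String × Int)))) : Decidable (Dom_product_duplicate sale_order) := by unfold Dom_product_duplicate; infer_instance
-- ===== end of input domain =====

-- B replaces A's incremental scan threading a seen-list and a flag by two aggregate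
-- passes (an all-truthy check plus a set-size uniqueness check); objective: simpler.

-- ===== PORT A =====
-- Python truthiness of `so_line.get('product_id', False)`: missing key → False (falsy),
-- present int → falsy iff 0; `product_id not in product_ids` is list membership on ints.
def pvStepA (st : List Int × Bool) (so_line : List (String × Int)) : List Int × Bool :=
  match PySem.Dict.get? (PySem.Dict.mk so_line) "product_id" with
  | some v => if decide (v ≠ 0) && !(st.1.contains v) then (st.1 ++ [v], st.2) else (st.1, false)
  | none => (st.1, false)

def product_duplicate (sale_order : List (String × List (List (String × Int)))) : Bool :=
  match PySem.Dict.get? (PySem.Dict.mk sale_order) "order_line" with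
  | none => true                                  -- lines = False, falsy
  | some lines =>
    if lines.isEmpty then true                    -- empty list is falsy
    else (lines.foldl pvStepA ([], true)).2

-- ===== PORT B =====
-- truthiness of a `line.get('product_id', False)` value (None ↦ missing/False)
def pvPidOk : Option Int → Bool
  | some v => decide (v ≠ 0)
  | none => false

def product_duplicate_alt (sale_order : List (String × List (List (String × Int)))) : Bool :=
  match PySem.Dict.get? (PySem.Dict.mk sale_order) "order_line" with
  | none => true
  | some lines =>
    if lines.isEmpty then true
    else
      let product_ids := lines.map (fun so_line => PySem.Dict.get? (PySem.Dict.mk so_line) "product_id")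
      product_ids.all pvPidOk && ((PySem.Set.ofList product_ids).length == product_ids.length)

-- ===== PRECONDITION & SPEC =====
def Spec_product_duplicate (sale_order : List (String × List (List (String × Int)))) (out : Bool) : Prop := out = product_duplicate_alt sale_order
instance (sale_order : List (String × List (List (String × Int)))) (out : Bool) : Decidable (Spec_product_duplicate sale_order out) := by unfold Spec_product_duplicate; infer_instance

-- ===== CLAIM (what is proved, stated in full; the proofs are below) =====
def Claim_equal_product_duplicate : Prop := ∀ (sale_order : List (String × List (List (String × Int)))), Dom_product_duplicate sale_order → Spec_product_duplicate sale_order (product_duplicate sale_order)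

-- ===== LEMMAS AND PROOFS =====

def pvPid (l : List (String × Int)) : Option Int := PySem.Dict.get? (PySem.Dict.mk l) "product_id"

def pvAdvA (seen : List Int) (l : List (String × Int)) : List Int :=
  match pvPid l with
  | some v => if decide (v ≠ 0) && !(seen.contains v) then seen ++ [v] else seen
  | none => seen

def pvGoodA (seen : List Int) (l : List (String × Int)) : Bool :=
  match pvPid l with
  | some v => decide (v ≠ 0) && !(seen.contains v)
  | none => false

def pvAllGood : List Int → List (List (String × Int)) → Bool
  | _, [] => true
  | seen, l :: ls => pvGoodA seen l && pvAllGood (pvAdvA seen l) ls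

theorem pvStepA_eq (st : List Int × Bool) (l : List (String × Int)) :
    pvStepA st l = (pvAdvA st.1 l, st.2 && pvGoodA st.1 l) := by
  unfold pvStepA pvAdvA pvGoodA pvPid
  cases PySem.Dict.get? (PySem.Dict.mk l) "product_id" with
  | none => simp
  | some v =>
    dsimp only
    cases hc : (decide (v ≠ 0) && !st.1.contains v) <;> simp [hc]

theorem pvFoldA (ls : List (List (String × Int))) :
    ∀ seen b, ls.foldl pvStepA (seen, b) = (ls.foldl pvAdvA seen, b && pvAllGood seen ls) := by
  induction ls with
  | nil => intro seen b; simp [pvAllGood]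
  | cons l ls ih =>
    intro seen b
    rw [List.foldl_cons, pvStepA_eq, List.foldl_cons]
    show List.foldl pvStepA (pvAdvA seen l, b && pvGoodA seen l) ls = _
    rw [ih]
    simp [pvAllGood, Bool.and_assoc]

theorem pvAllGood_iff (ls : List (List (String × Int))) :
    ∀ seen, pvAllGood seen ls = true ↔
      ((ls.map pvPid).all pvPidOk = true ∧ (ls.map pvPid).Nodup ∧
        ∀ l ∈ ls, ∀ v, pvPid l = some v → v ∉ seen) := by
  induction ls with
  | nil => intro seen; simp [pvAllGood]
  | cons l ls ih =>
    intro seen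
    show (pvGoodA seen l && pvAllGood (pvAdvA seen l) ls) = true ↔ _
    cases h : pvPid l with
    | none =>
      simp [pvGoodA, h, pvPidOk]
    | some v =>
      by_cases hv : v = 0
      · subst hv; simp [pvGoodA, h, pvPidOk]
      · by_cases hs : v ∈ seen
        · have hg : pvGoodA seen l = false := by
            simp [pvGoodA, h, hs]
          rw [hg]
          simp only [Bool.false_and, Bool.false_eq_true, false_iff]
          intro hc
          exact absurd hs (hc.2.2 l (List.mem_cons_self) v h)
        · have hg : pvGoodA seen l = true := by
            simp [pvGoodA, h, hs, hv]
          have hadv : pvAdvA seen l = seen ++ [v] := by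
            simp [pvAdvA, h, hv, hs]
          rw [hg, hadv, Bool.true_and, ih]
          constructor
          · rintro ⟨h1, h2, h3⟩
            refine ⟨?_, ?_, ?_⟩
            · simp [h, pvPidOk, hv, h1]
            · rw [List.map_cons, List.nodup_cons]
              refine ⟨?_, h2⟩
              intro hmem
              rcases List.mem_map.mp hmem with ⟨l', hl', hpl'⟩
              exact (h3 l' hl' v (hpl'.trans h)) (by simp)
            · intro l' hl' w hw
              rcases List.mem_cons.mp hl' with rfl | hl'
              · rw [h] at hw; injection hw with hw; subst hw; exact hs
              · intro hmem
                exact (h3 l' hl' w hw) (by simp [hmem])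
          · rintro ⟨h1, h2, h3⟩
            rw [List.map_cons, List.all_cons, Bool.and_eq_true] at h1
            rw [List.map_cons, List.nodup_cons] at h2
            refine ⟨h1.2, h2.2, ?_⟩
            intro l' hl' w hw
            intro hmem
            rcases List.mem_append.mp hmem with hmem | hmem
            · exact (h3 l' (List.mem_cons_of_mem _ hl') w hw) hmem
            · have hwv : w = v := by simpa using hmem
              subst hwv
              exact h2.1 (List.mem_map.mpr ⟨l', hl', hw.trans h.symm⟩)

theorem pvOfList_len_lt (xs : List (Option Int)) (h : ¬ xs.Nodup) :
    (PySem.Set.ofList xs).length < xs.length := by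
  induction xs with
  | nil => exact absurd List.nodup_nil h
  | cons x xs ih =>
    rw [PySem.Set.ofList_cons]
    simp only [List.length_cons, Nat.add_lt_add_iff_right]
    by_cases hx : x ∈ xs
    · have hmem : x ∈ PySem.Set.ofList xs := (PySem.Set.mem_ofList xs x).mpr hx
      calc ((PySem.Set.ofList xs).discard x).length
          < (PySem.Set.ofList xs).length := by
            unfold PySem.Set.discard
            apply List.length_filter_lt_length_iff_exists.mpr
            exact ⟨x, hmem, by simp⟩
        _ ≤ xs.length := PySem.Set.length_ofList_le xs
    · have hnx : ¬ xs.Nodup := by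
        intro hnd; exact h (List.nodup_cons.mpr ⟨hx, hnd⟩)
      calc ((PySem.Set.ofList xs).discard x).length
          ≤ (PySem.Set.ofList xs).length := by
            unfold PySem.Set.discard; exact List.length_filter_le _ _
        _ < xs.length := ih hnx

theorem pvOfList_len_eq_iff (xs : List (Option Int)) :
    (PySem.Set.ofList xs).length = xs.length ↔ xs.Nodup := by
  constructor
  · intro h
    by_contra hn
    exact absurd h (Nat.ne_of_lt (pvOfList_len_lt xs hn))
  · intro h; rw [PySem.Set.ofList_eq_self_of_nodup xs h]

-- ===== VERDICT (by name: the statement is the Claim_ definition above) =====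
theorem product_duplicate_spec : Claim_equal_product_duplicate := by
  intro sale_order _
  unfold Spec_product_duplicate product_duplicate product_duplicate_alt
  cases PySem.Dict.get? (PySem.Dict.mk sale_order) "order_line" with
  | none => rfl
  | some lines =>
    dsimp only
    by_cases he : lines.isEmpty = true
    · simp [he]
    · rw [if_neg he, if_neg he]
      rw [pvFoldA lines [] true]
      simp only [Bool.true_and]
      rw [Bool.eq_iff_iff, pvAllGood_iff lines []]
      simp only [show (fun so_line => PySem.Dict.get? (PySem.Dict.mk so_line) "product_id") = pvPid from rfl,
        Bool.and_eq_true, beq_iff_eq, pvOfList_len_eq_iff]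
      constructor
      · rintro ⟨h1, h2, _⟩
        exact ⟨h1, h2⟩
      · rintro ⟨h1, h2⟩
        exact ⟨h1, h2, fun l _ v _ hmem => absurd hmem (by simp)⟩
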